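-- pv_equiv track=rewrite | github.com/Nicolaspwilde/Holocron | Card Locator.py | card_locator
-- ===== SOURCE A (Python) =====
-- def card_locator(cards, query):
--     position = 0
--     occurrence = 0
--     first_match_pos = -1
--
--     while position < len(cards):
--         if cards[position] == query:
--             occurrence += 1
--             if first_match_pos == -1:
--                 first_match_pos = position + 1  # 1-based index
--         position += 1
--
--     if occurrence > 0:
--         return first_match_pos, occurrence
--     else:
--         return -1, 0
-- ===== SOURCE B (Python) =====
-- def card_locator(cards, query):
--     occurrence = cards.count(query)
--     if occurrence == 0:
--         return -1, 0
--     return cards.index(query) + 1, occurrence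
-- ===== Notes on version B (the rewrite author's own statement) =====
-- stated objective: simpler
-- what changed: Replaces the manual index-tracking while loop (position, occurrence, first_match_pos state) with two library scans: count() for the occurrence count and index()+1 for the 1-based first position, guarded by count==0 for the (-1,0) sentinel.
import Mathlib
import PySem

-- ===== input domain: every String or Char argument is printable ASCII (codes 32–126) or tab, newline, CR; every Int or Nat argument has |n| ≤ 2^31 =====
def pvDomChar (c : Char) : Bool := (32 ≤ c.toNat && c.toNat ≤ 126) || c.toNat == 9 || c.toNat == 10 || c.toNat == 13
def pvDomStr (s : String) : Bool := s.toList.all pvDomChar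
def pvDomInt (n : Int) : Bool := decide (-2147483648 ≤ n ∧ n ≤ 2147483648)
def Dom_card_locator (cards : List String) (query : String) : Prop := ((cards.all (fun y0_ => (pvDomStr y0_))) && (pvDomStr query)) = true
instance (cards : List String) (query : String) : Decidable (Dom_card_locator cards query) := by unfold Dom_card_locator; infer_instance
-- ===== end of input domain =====

-- B replaces A's single index-tracking while loop with two library scans (count, then index); objective: simpler.

-- ===== PORT A =====
-- A's while loop: position walks the list, accumulating occurrence and first_match_pos.
def cardLocGoA (query : String) : List String → Nat → Int → Int → Int × Int
  | [], _, occ, first => if occ > 0 then (first, occ) else (-1, 0)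
  | c :: rest, pos, occ, first =>
      if c == query then
        cardLocGoA query rest (pos + 1) (occ + 1) (if first == -1 then (pos : Int) + 1 else first)
      else
        cardLocGoA query rest (pos + 1) occ first

def card_locator (cards : List String) (query : String) : Int × Int :=
  cardLocGoA query cards 0 0 (-1)

-- ===== PORT B =====
def card_locator_alt (cards : List String) (query : String) : Int × Int :=
  let occurrence := PySem.List.count cards query
  if occurrence = 0 then (-1, 0)
  else ((((PySem.List.index? cards query).getD 0 : Nat) : Int) + 1, (occurrence : Int))

-- ===== PRECONDITION & SPEC =====
def Spec_card_locator (cards : List String) (query : String) (out : Int × Int) : Prop := out = card_locator_alt cards query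
instance (cards : List String) (query : String) (out : Int × Int) : Decidable (Spec_card_locator cards query out) := by unfold Spec_card_locator; infer_instance

-- ===== CLAIM (what is proved, stated in full; the proofs are below) =====
def Claim_equal_card_locator : Prop := ∀ (cards : List String) (query : String), Dom_card_locator cards query → Spec_card_locator cards query (card_locator cards query)

-- ===== LEMMAS AND PROOFS =====

-- Once a first match has been recorded (occ > 0, first ≠ -1), the loop only adds the remaining count.
theorem cardLocGoA_found (query : String) (rest : List String) :
    ∀ (pos : Nat) (occ first : Int), 0 < occ → first ≠ -1 →
      cardLocGoA query rest pos occ first = (first, occ + (PySem.List.count rest query : Int)) := by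
  induction rest with
  | nil =>
      intro pos occ first h hf
      simp [cardLocGoA, PySem.List.count, h]
  | cons c rest ih =>
      intro pos occ first h hf
      by_cases hc : c == query
      · have hq : c = query := beq_iff_eq.mp hc
        rw [show cardLocGoA query (c :: rest) pos occ first
              = cardLocGoA query rest (pos + 1) (occ + 1) first by
            simp [cardLocGoA, hc, hf]]
        rw [ih (pos + 1) (occ + 1) first (by omega) hf]
        rw [PySem.List.count_eq, PySem.List.count_eq, List.count_cons]
        simp [hq]
        omega
      · have hq : c ≠ query := fun h' => hc (beq_iff_eq.mpr h')
        rw [show cardLocGoA query (c :: rest) pos occ first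
              = cardLocGoA query rest (pos + 1) occ first by simp [cardLocGoA, hc]]
        rw [ih (pos + 1) occ first h hf]
        rw [PySem.List.count_eq, PySem.List.count_eq, List.count_cons]
        simp [hq]

-- Before the first match (occ = 0, first = -1) the loop computes B's answer, offset by pos.
theorem cardLocGoA_searching (query : String) (rest : List String) :
    ∀ (pos : Nat),
      cardLocGoA query rest pos 0 (-1) =
        if PySem.List.count rest query = 0 then (-1, 0)
        else ((pos : Int) + (((PySem.List.index? rest query).getD 0 : Nat) : Int) + 1,
              (PySem.List.count rest query : Int)) := by
  induction rest with
  | nil => intro pos; simp [cardLocGoA, PySem.List.count]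
  | cons c rest ih =>
      intro pos
      by_cases hc : c == query
      · have hq : c = query := beq_iff_eq.mp hc
        rw [show cardLocGoA query (c :: rest) pos 0 (-1)
              = cardLocGoA query rest (pos + 1) 1 ((pos : Int) + 1) by
            simp [cardLocGoA, hc]]
        rw [cardLocGoA_found query rest (pos + 1) 1 ((pos : Int) + 1) (by omega) (by omega)]
        subst hq
        rw [PySem.List.index?_cons_self]
        rw [PySem.List.count_eq, PySem.List.count_eq, List.count_cons]
        simp
        omega
      · have hq : c ≠ query := fun h' => hc (beq_iff_eq.mpr h')
        rw [show cardLocGoA query (c :: rest) pos 0 (-1)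
              = cardLocGoA query rest (pos + 1) 0 (-1) by simp [cardLocGoA, hc]]
        rw [ih (pos + 1), PySem.List.index?_cons_of_ne rest hq]
        rw [PySem.List.count_eq, PySem.List.count_eq, List.count_cons]
        by_cases h0 : List.count query rest = 0
        · simp [h0, hq]
        · have hmem : query ∈ rest := by
            by_contra hm
            exact h0 (List.count_eq_zero.mpr hm)
          obtain ⟨k, hk⟩ := Option.isSome_iff_exists.mp
            ((PySem.List.index?_isSome_iff rest query).mpr hmem)
          rw [PySem.List.index?_eq_idxOf?] at hk
          simp [h0, hq, hk]
          omega

-- ===== VERDICT (by name: the statement is the Claim_ definition above) =====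
theorem card_locator_spec : Claim_equal_card_locator := by
  intro cards query _
  unfold Spec_card_locator card_locator card_locator_alt
  rw [cardLocGoA_searching query cards 0]
  split <;> simp_all
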